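-- pv_equiv track=rewrite | github.com/BobVitorBob/arima-pressao | teste.py | sep_anomalies
-- ===== SOURCE A (Python) =====
-- def sep_anomalies(anomalies):
-- 	anom_start = -1
-- 	isolated_anomalies = []
-- 	continuous_anomalies = []
-- 	for i, anomaly in enumerate(anomalies):
-- 		# Se o próximo for anomalia
-- 		if i < (len(anomalies) - 1) and anomalies[i+1] == anomaly+1:
-- 			# E o anterior não for ou for o primeiro da lista
-- 			if anomalies[i-1] != anomaly-1 or i == 0:
-- 				# É começo de uma contínua
-- 				anom_start = anomaly
-- 		# Se o anterior é anomalia e o próximo não for ou for o fim da lista, é fim de contínuo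
-- 		elif i > 0 and anomalies[i-1] == anomaly-1:
-- 			continuous_anomalies.append((anom_start, anomaly))
-- 			anom_start = -1
-- 		# Se o próximo e o anterior não forem anomalia, é isolado
-- 		else:
-- 			isolated_anomalies.append(anomaly)
-- 	return isolated_anomalies, continuous_anomalies
-- ===== SOURCE B (Python) =====
-- def sep_anomalies(anomalies):
--     # Phase 1: segment into maximal runs of consecutive values, kept as (first, last).
--     runs = []
--     for v in anomalies:
--         if runs and v == runs[-1][1] + 1:
--             runs[-1] = (runs[-1][0], v)
--         else:
--             runs.append((v, v))
--     # Phase 2: classify runs.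
--     isolated_anomalies = [a for a, b in runs if a == b]
--     continuous_anomalies = [(a, b) for a, b in runs if a != b]
--     return isolated_anomalies, continuous_anomalies
-- ===== Notes on version B (the rewrite author's own statement) =====
-- stated objective: alternative
-- what changed: Replaces the inline anom_start state machine with index lookahead/lookbehind by a two-phase pass: first segment the list into maximal consecutive runs stored as (first,last) pairs, then classify each run as isolated (length 1) or continuous (length >= 2).
import Mathlib
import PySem

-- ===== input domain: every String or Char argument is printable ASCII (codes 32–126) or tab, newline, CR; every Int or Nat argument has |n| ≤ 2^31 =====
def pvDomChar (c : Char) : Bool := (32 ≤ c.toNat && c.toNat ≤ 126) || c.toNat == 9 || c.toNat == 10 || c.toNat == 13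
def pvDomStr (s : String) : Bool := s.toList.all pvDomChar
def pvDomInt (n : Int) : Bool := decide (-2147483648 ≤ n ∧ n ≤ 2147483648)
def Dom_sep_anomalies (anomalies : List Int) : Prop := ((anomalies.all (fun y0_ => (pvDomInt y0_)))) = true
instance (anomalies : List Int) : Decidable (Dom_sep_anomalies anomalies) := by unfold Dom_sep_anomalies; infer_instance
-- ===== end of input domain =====

-- B replaces A's inline anom_start state machine (with index lookahead/lookbehind) by run
-- segmentation into (first,last) pairs followed by classification; objective: alternative.

-- ===== PORT A =====
-- loop body of A; `anomalies[i-1]`/`anomalies[i+1]` are in range whenever Python evaluates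
-- them during the loop (at i = 0, `anomalies[-1]` wraps to the last element as in Python),
-- so pyGet? is always `some` and `.getD 0` is exact.
def stepA (anomalies : List Int) (st : Int × List Int × List (Int × Int)) (p : Int × Int) :
    Int × List Int × List (Int × Int) :=
  let n : Int := (anomalies.length : Int)
  let i := p.1
  let anomaly := p.2
  if i < n - 1 ∧ (PySem.List.pyGet? anomalies (i + 1)).getD 0 = anomaly + 1 then
    if (PySem.List.pyGet? anomalies (i - 1)).getD 0 ≠ anomaly - 1 ∨ i = 0 then
      (anomaly, st.2.1, st.2.2)
    else st
  else if 0 < i ∧ (PySem.List.pyGet? anomalies (i - 1)).getD 0 = anomaly - 1 then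
    (-1, st.2.1, st.2.2 ++ [(st.1, anomaly)])
  else
    (st.1, st.2.1 ++ [anomaly], st.2.2)

def sep_anomalies (anomalies : List Int) : List Int × (List (Int × Int)) :=
  let res := (PySem.List.enumerate anomalies).foldl (stepA anomalies)
    ((-1 : Int), ([] : List Int), ([] : List (Int × Int)))
  (res.2.1, res.2.2)

-- ===== PORT B =====
-- phase 1 loop body: extend the last run or start a fresh one
def stepB (runs : List (Int × Int)) (v : Int) : List (Int × Int) :=
  match runs.getLast? with
  | some r => if v = r.2 + 1 then runs.dropLast ++ [(r.1, v)] else runs ++ [(v, v)]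
  | none => runs ++ [(v, v)]

def sep_anomalies_alt (anomalies : List Int) : List Int × (List (Int × Int)) :=
  let runs := anomalies.foldl stepB []
  (runs.filterMap (fun p => if p.1 = p.2 then some p.1 else none),
   runs.filter (fun p => p.1 ≠ p.2))

-- ===== PRECONDITION & SPEC =====
def Spec_sep_anomalies (anomalies : List Int) (out : List Int × (List (Int × Int))) : Prop := out = sep_anomalies_alt anomalies
instance (anomalies : List Int) (out : List Int × (List (Int × Int))) : Decidable (Spec_sep_anomalies anomalies out) := by unfold Spec_sep_anomalies; infer_instance

-- ===== CLAIM (what is proved, stated in full; the proofs are below) =====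
def Claim_equal_sep_anomalies : Prop := ∀ (anomalies : List Int), Dom_sep_anomalies anomalies → Spec_sep_anomalies anomalies (sep_anomalies anomalies)

-- ===== LEMMAS AND PROOFS =====

-- reference recursion: runs of consecutive values, current open run (a, b)
def runsRec : Int → Int → List Int → List (Int × Int)
  | a, b, [] => [(a, b)]
  | a, b, v :: t => if v = b + 1 then runsRec a v t else (a, b) :: runsRec v v t

-- A's loop rephrased structurally: state = recorded run start, previous element, current, rest
def goA : Int → Option Int → Int → List Int → List Int × List (Int × Int)
  | start, prev, cur, nx :: t =>
    if nx = cur + 1 then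
      goA (if prev ≠ some (cur - 1) then cur else start) (some cur) nx t
    else if prev = some (cur - 1) then
      let r := goA (-1) (some cur) nx t
      (r.1, (start, cur) :: r.2)
    else
      let r := goA start (some cur) nx t
      (cur :: r.1, r.2)
  | start, prev, cur, [] =>
    if prev = some (cur - 1) then ([], [(start, cur)]) else ([cur], [])

def classify (rs : List (Int × Int)) : List Int × List (Int × Int) :=
  (rs.filterMap (fun p => if p.1 = p.2 then some p.1 else none),
   rs.filter (fun p => p.1 ≠ p.2))

lemma foldB_append (l : List Int) : ∀ (rs : List (Int × Int)) (a b : Int),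
    l.foldl stepB (rs ++ [(a, b)]) = rs ++ runsRec a b l := by
  induction l with
  | nil => intro rs a b; simp [runsRec]
  | cons v t ih =>
    intro rs a b
    simp only [List.foldl_cons, runsRec]
    have hstep : stepB (rs ++ [(a, b)]) v
        = if v = b + 1 then rs ++ [(a, v)] else (rs ++ [(a, b)]) ++ [(v, v)] := by
      simp [stepB, List.getLast?_append]
    by_cases h : v = b + 1
    · rw [hstep, if_pos h, if_pos h, ih]
    · rw [hstep, if_neg h, if_neg h, ih (rs ++ [(a, b)]) v v, List.append_assoc]
      simp

lemma goA_eq_classify (t : List Int) : ∀ (cur : Int) (prev : Option Int),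
    (∀ a : Int, prev = some (cur - 1) → a < cur →
      goA a prev cur t = classify (runsRec a cur t)) ∧
    (∀ s : Int, prev ≠ some (cur - 1) →
      goA s prev cur t = classify (runsRec cur cur t)) := by
  induction t with
  | nil =>
    intro cur prev
    refine ⟨fun a hp ha => ?_, fun s hp => ?_⟩
    · subst hp
      simp [goA, runsRec, classify, show ¬ a = cur from by omega]
    · simp [goA, hp, runsRec, classify]
  | cons nx t ih =>
    intro cur prev
    refine ⟨fun a hp ha => ?_, fun s hp => ?_⟩
    · subst hp
      by_cases hnx : nx = cur + 1
      · subst hnx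
        have h1 := (ih (cur + 1) (some cur)).1 a (by norm_num) (by omega)
        simp [goA, runsRec, h1]
      · have h2 := (ih nx (some cur)).2 (-1) (by simp; omega)
        simp [goA, runsRec, hnx, h2, classify, show ¬ a = cur from by omega]
    · by_cases hnx : nx = cur + 1
      · subst hnx
        have h1 := (ih (cur + 1) (some cur)).1 cur (by norm_num) (by omega)
        simp [goA, runsRec, hp, h1]
      · have h2 := (ih nx (some cur)).2 s (by simp; omega)
        simp [goA, runsRec, hnx, hp, h2, classify]

-- `anomalies[i-1]` at a positive loop index is the last element of the prefix
lemma pyPrev (pre rest : List Int) (h : pre ≠ []) :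
    PySem.List.pyGet? (pre ++ rest) ((pre.length : Int) - 1) = pre.getLast? := by
  have hl : 0 < pre.length := List.length_pos_of_ne_nil h
  rw [show ((pre.length : Int) - 1) = ((pre.length - 1 : Nat) : Int) from by omega,
    PySem.List.pyGet?_natCast, List.getElem?_append_left (by omega),
    List.getLast?_eq_getElem?]

lemma foldA_eq_goA (t : List Int) : ∀ (pre : List Int) (cur start : Int)
    (iso : List Int) (cont : List (Int × Int)),
    (((PySem.List.enumerate (cur :: t) (pre.length : Int)).foldl
        (stepA (pre ++ cur :: t)) (start, iso, cont)).2 : List Int × List (Int × Int))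
      = (iso ++ (goA start pre.getLast? cur t).1, cont ++ (goA start pre.getLast? cur t).2) := by
  induction t with
  | nil =>
    intro pre cur start iso cont
    rw [PySem.List.enumerate_cons, PySem.List.enumerate_nil, List.foldl_cons, List.foldl_nil]
    simp only [stepA]
    have hlen : (((pre ++ [cur]).length : Nat) : Int) = (pre.length : Int) + 1 := by
      simp
    rw [if_neg (fun h => by rw [hlen] at h; exact absurd h.1 (by omega))]
    cases pre with
    | nil =>
      rw [if_neg (by simp)]
      simp [goA]
    | cons p ps =>
      obtain ⟨g, hg⟩ := Option.isSome_iff_exists.mp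
        (List.getLast?_isSome.mpr (by simp) : (p :: ps).getLast?.isSome)
      rw [pyPrev _ _ (by simp), hg]
      by_cases hp : g = cur - 1
      · rw [if_pos ⟨by exact_mod_cast Nat.succ_pos ps.length, by simp [hp]⟩]
        simp [goA, hp]
      · rw [if_neg (by simp [hp])]
        simp [goA, hp]
  | cons nx t2 ih =>
    intro pre cur start iso cont
    have hget1 : (PySem.List.pyGet? (pre ++ cur :: nx :: t2) ((pre.length : Int) + 1)).getD 0 = nx := by
      rw [show ((pre.length : Int) + 1) = ((pre.length + 1 : Nat) : Int) from by push_cast; ring,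
        PySem.List.pyGet?_natCast, List.getElem?_append_right (by omega)]
      simp
    have hcond1 : (pre.length : Int) < ((pre ++ cur :: nx :: t2).length : Int) - 1 := by
      simp
      omega
    have key : ∀ st' : Int × List Int × List (Int × Int),
        (((PySem.List.enumerate (nx :: t2) ((pre.length : Int) + 1)).foldl
          (stepA (pre ++ cur :: nx :: t2)) st').2 : List Int × List (Int × Int))
        = (st'.2.1 ++ (goA st'.1 (some cur) nx t2).1,
           st'.2.2 ++ (goA st'.1 (some cur) nx t2).2) := by
      intro st'
      have h := ih (pre ++ [cur]) nx st'.1 st'.2.1 st'.2.2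
      simp only [List.append_assoc, List.cons_append, List.nil_append,
        List.getLast?_concat] at h
      rw [show (((pre ++ [cur]).length : Nat) : Int) = (pre.length : Int) + 1 from by simp] at h
      exact h
    rw [PySem.List.enumerate_cons, List.foldl_cons]
    by_cases hnx : nx = cur + 1
    · -- first branch of A fires: possibly record a run start, emit nothing
      have hstep : stepA (pre ++ cur :: nx :: t2) (start, iso, cont) ((pre.length : Int), cur)
          = ((if pre.getLast? ≠ some (cur - 1) then cur else start), iso, cont) := by
        simp only [stepA]
        rw [if_pos ⟨hcond1, by rw [hget1, hnx]⟩]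
        cases pre with
        | nil => simp
        | cons p ps =>
          obtain ⟨g, hg⟩ := Option.isSome_iff_exists.mp
            (List.getLast?_isSome.mpr (by simp) : (p :: ps).getLast?.isSome)
          rw [pyPrev _ _ (by simp), hg]
          by_cases hp : g = cur - 1
          · rw [if_neg (fun hor => hor.elim (fun h1 => h1 (by simp [hp])) (fun h2 => by simp at h2; omega)),
              if_neg (by simp [hp])]
          · rw [if_pos (Or.inl (by simp [hp])), if_pos (by simp [hp])]
      rw [hstep, key]
      simp only [goA, if_pos hnx]
    · have hc1 : ¬ ((pre.length : Int) < ((pre ++ cur :: nx :: t2).length : Int) - 1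
          ∧ (PySem.List.pyGet? (pre ++ cur :: nx :: t2) ((pre.length : Int) + 1)).getD 0 = cur + 1) := by
        rw [hget1]; tauto
      cases pre with
      | nil =>
        have hstep : stepA ([] ++ cur :: nx :: t2) (start, iso, cont) (((List.nil (α := Int)).length : Int), cur)
            = (start, iso ++ [cur], cont) := by
          simp only [stepA]
          rw [if_neg (by simpa using hc1), if_neg (by simp)]
        rw [hstep, key]
        simp [goA, if_neg hnx]
      | cons p ps =>
        obtain ⟨g, hg⟩ := Option.isSome_iff_exists.mp
          (List.getLast?_isSome.mpr (by simp) : (p :: ps).getLast?.isSome)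
        by_cases hp : g = cur - 1
        · have hstep : stepA ((p :: ps) ++ cur :: nx :: t2) (start, iso, cont) (((p :: ps).length : Int), cur)
              = (-1, iso, cont ++ [(start, cur)]) := by
            simp only [stepA]
            rw [if_neg hc1, if_pos ⟨by exact_mod_cast Nat.succ_pos ps.length,
              by rw [pyPrev _ _ (by simp), hg]; simp [hp]⟩]
          rw [hstep, key]
          simp [goA, if_neg hnx, hg, hp]
        · have hstep : stepA ((p :: ps) ++ cur :: nx :: t2) (start, iso, cont) (((p :: ps).length : Int), cur)
              = (start, iso ++ [cur], cont) := by
            simp only [stepA]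
            rw [if_neg hc1, if_neg (by rw [pyPrev _ _ (by simp), hg]; simp [hp])]
          rw [hstep, key]
          simp [goA, if_neg hnx, hg, hp]

-- ===== VERDICT (by name: the statement is the Claim_ definition above) =====
theorem sep_anomalies_spec : Claim_equal_sep_anomalies := by
  intro anomalies _
  unfold Spec_sep_anomalies
  cases anomalies with
  | nil => simp [sep_anomalies, sep_anomalies_alt, PySem.List.enumerate_nil]
  | cons c t =>
    have hA := foldA_eq_goA t [] c (-1) [] []
    simp only [List.length_nil, Nat.cast_zero, List.nil_append, List.getLast?_nil] at hA
    have hgo := (goA_eq_classify t c none).2 (-1) (by simp)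
    have hB : (c :: t).foldl stepB [] = runsRec c c t := by
      have h0 : stepB [] c = [] ++ [(c, c)] := by simp [stepB]
      simpa [h0] using foldB_append t [] c c
    show sep_anomalies (c :: t) = sep_anomalies_alt (c :: t)
    simp only [sep_anomalies, sep_anomalies_alt, hB]
    rw [show (((PySem.List.enumerate (c :: t)).foldl (stepA (c :: t)) (-1, [], [])).2.1,
        ((PySem.List.enumerate (c :: t)).foldl (stepA (c :: t)) (-1, [], [])).2.2)
        = ((PySem.List.enumerate (c :: t)).foldl (stepA (c :: t)) (-1, ([], []))).2 from rfl]
    rw [hA, hgo]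
    rfl
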